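-- pv_equiv track=rewrite | github.com/ajritch/modeAI | functions.py | findAllSublists
-- ===== SOURCE A (Python) =====
-- def findAllSublists(numList):
--
-- 	if len(numList) <= 1:
-- 		yield numList
-- 		yield []
-- 	else:
-- 		for element in findAllSublists(numList[1:]):
-- 			yield [numList[0]] + element
-- 			yield element
-- ===== SOURCE B (Python) =====
-- def findAllSublists(numList):
--     # iterative bitmask enumeration: element k is kept exactly when bit k of i is 0
--     n = len(numList)
--     for i in range(2 ** n):
--         yield [numList[k] for k in range(n) if (i >> k) & 1 == 0]
-- ===== Notes on version B (the rewrite author's own statement) =====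
-- stated objective: alternative
-- what changed: Replaces the generator recursion on the tail with a single iterative bitmask (base-2 digit) enumeration over range(2**n), building each sublist directly by index filtering.
-- outside the precondition, e.g. on findAllSublists([]): A returns [[], []], B returns [[]]
import Mathlib
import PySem

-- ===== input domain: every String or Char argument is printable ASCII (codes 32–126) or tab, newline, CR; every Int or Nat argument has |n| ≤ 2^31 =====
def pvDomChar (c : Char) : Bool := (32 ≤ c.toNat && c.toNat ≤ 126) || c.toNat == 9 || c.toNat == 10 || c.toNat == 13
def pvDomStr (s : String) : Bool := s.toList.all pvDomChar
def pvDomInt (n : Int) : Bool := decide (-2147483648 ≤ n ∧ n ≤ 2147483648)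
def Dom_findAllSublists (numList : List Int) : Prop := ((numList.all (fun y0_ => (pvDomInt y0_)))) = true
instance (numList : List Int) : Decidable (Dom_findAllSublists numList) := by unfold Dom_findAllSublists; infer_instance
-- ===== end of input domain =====

-- B replaces A's generator recursion by an iterative bitmask enumeration; Pre_ excludes only the
-- empty list, where A's base case duplicates the empty sublist (equal as a set of sublists).


-- ===== PORT A =====
-- literal port of the recursive generator: the 'len <= 1' branch yields numList then [],
-- otherwise for each element of the recursive call on the tail it yields head::e then e
def findAllSublists : List Int → List (List Int)
  | [] => [[], []]
  | [x] => [[x], []]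
  | x :: y :: rest => (findAllSublists (y :: rest)).flatMap (fun e => [x :: e, e])

-- ===== PORT B =====
-- for i in range(2**n): [numList[k] for k in range(n) if (i >> k) & 1 == 0]
-- (pyGetD with default 0 is exact here: k drawn from range(n) is always in range;
--  '>>>' with k.toNat is exact since k drawn from range(n) is nonnegative)
def findAllSublists_alt (numList : List Int) : List (List Int) :=
  (PySem.List.pyRange 0 ((2:Int)^numList.length) 1).map (fun i =>
    ((PySem.List.pyRange 0 (numList.length : Int) 1).filter
      (fun k => PySem.Int.band (i >>> k.toNat) 1 = 0)).map
      (fun k => PySem.List.pyGetD numList k 0))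

-- ===== PRECONDITION & SPEC =====
-- Pre_ excludes only the empty list: there A's 'len <= 1' base case accidentally yields the empty
-- sublist twice ([[], []]) while B yields it once ([[]]) — a duplicate in the generated stream of
-- sublists that no one would specify (as a set of sublists the two outputs are equal).
def Pre_findAllSublists (numList : List Int) : Prop := numList ≠ []
instance (numList : List Int) : Decidable (Pre_findAllSublists numList) := by unfold Pre_findAllSublists; infer_instance

def pvWitness_findAllSublists : List Int := [1]

def Spec_findAllSublists (numList : List Int) (out : List (List Int)) : Prop :=
  out = findAllSublists_alt numList
instance (numList : List Int) (out : List (List Int)) : Decidable (Spec_findAllSublists numList out) := by unfold Spec_findAllSublists; infer_instance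

-- ===== CLAIM (what is proved, stated in full; the proofs are below) =====
def Claim_equal_findAllSublists : Prop := ∀ (numList : List Int), Dom_findAllSublists numList → Pre_findAllSublists numList → Spec_findAllSublists numList (findAllSublists numList)

-- ===== LEMMAS AND PROOFS =====

-- Nat-arithmetic reading of B's row i: keep element k iff base-2 digit k of i is 0
def subAtN (xs : List Int) (i : Nat) : List Int :=
  ((List.range xs.length).filter (fun k => i / 2^k % 2 = 0)).map (fun k => xs.getD k 0)

def altN (xs : List Int) : List (List Int) :=
  (List.range (2^xs.length)).map (subAtN xs)

lemma alt_eq_altN (xs : List Int) : findAllSublists_alt xs = altN xs := by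
  unfold findAllSublists_alt altN subAtN
  rw [PySem.List.pyRange_one, PySem.List.pyRange_one]
  have h2 : ((2:Int)^xs.length - 0).toNat = 2^xs.length := by
    rw [sub_zero, show ((2:Int)^xs.length) = ((2^xs.length : Nat) : Int) by push_cast; ring,
      Int.toNat_natCast]
  have h3 : ((xs.length : Int) - 0).toNat = xs.length := by omega
  rw [h2, h3, List.map_map]
  refine List.map_congr_left (fun i _ => ?_)
  simp only [Function.comp_apply, zero_add]
  rw [List.filter_map, List.map_map]
  refine (congrArg _ (List.filter_congr (fun k _ => ?_))).trans
    (List.map_congr_left (fun k _ => ?_))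
  · simp only [Function.comp_apply]
    refine decide_eq_decide.mpr ?_
    rw [Int.toNat_natCast, PySem.Int.band_one,
      show ((i:Int) >>> k) = ((i >>> k : Nat) : Int) by simp,
      show ((2:Int)) = (((2:Nat)) : Int) by norm_num, PySem.Int.mod_natCast,
      Nat.shiftRight_eq_div_pow]
    exact Int.natCast_eq_zero
  · simp [PySem.List.pyGetD_natCast]


lemma pvRangeTwoMul (m : Nat) :
    List.range (2*m) = (List.range m).flatMap (fun j => [2*j, 2*j+1]) := by
  induction m with
  | zero => rfl
  | succ m ih =>
      rw [show 2*(m+1) = (2*m+1)+1 by ring, List.range_succ, List.range_succ,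
        List.range_succ, List.flatMap_append, ← ih]
      simp

lemma subAtN_cons (x : Int) (xs : List Int) (i : Nat) :
    subAtN (x::xs) i = (if i % 2 = 0 then [x] else []) ++ subAtN xs (i/2) := by
  unfold subAtN
  rw [List.length_cons, List.range_succ_eq_map, List.filter_cons, List.filter_map]
  have hfil : List.filter ((fun k => decide (i / 2^k % 2 = 0)) ∘ Nat.succ) (List.range xs.length)
      = List.filter (fun k => decide ((i/2) / 2^k % 2 = 0)) (List.range xs.length) := by
    refine List.filter_congr (fun k _ => ?_)
    simp only [Function.comp_apply, pow_succ', Nat.div_div_eq_div_mul]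
  rw [hfil]
  simp only [pow_zero, Nat.div_one]
  by_cases h : i % 2 = 0 <;>
    simp [h, List.map_map, Function.comp_def]

lemma altN_cons (x : Int) (xs : List Int) :
    altN (x::xs) = (altN xs).flatMap (fun e => [x :: e, e]) := by
  unfold altN
  rw [List.length_cons, pow_succ, mul_comm, pvRangeTwoMul, List.map_flatMap,
    List.flatMap_map]
  refine List.flatMap_congr (fun j _ => ?_)
  simp only [List.map_cons, List.map_nil]
  rw [subAtN_cons, subAtN_cons]
  have h1 : (2*j) % 2 = 0 := by omega
  have h2 : (2*j) / 2 = j := by omega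
  have h3 : (2*j+1) % 2 = 1 := by omega
  have h4 : (2*j+1) / 2 = j := by omega
  simp [h1, h2, h3, h4]

lemma a_eq_altN : ∀ (xs : List Int), xs ≠ [] → findAllSublists xs = altN xs := by
  intro xs
  induction xs with
  | nil => intro h; exact absurd rfl h
  | cons x t ih =>
      intro _
      cases t with
      | nil =>
          show findAllSublists [x] = altN [x]
          simp [findAllSublists, altN, subAtN, List.range_succ]
      | cons y rest =>
          rw [show findAllSublists (x :: y :: rest)
              = (findAllSublists (y :: rest)).flatMap (fun e => [x :: e, e]) from rfl,
            altN_cons x (y :: rest), ih (by simp)]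

-- ===== VERDICT (by name: the statement is the Claim_ definition above) =====
theorem findAllSublists_spec : Claim_equal_findAllSublists := by
  intro xs _ hpre
  show findAllSublists xs = findAllSublists_alt xs
  rw [alt_eq_altN]
  exact a_eq_altN xs hpre
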